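-- pv_equiv track=rewrite | github.com/parksu111/REM_GMM | utils/rempropensity.py | nrt_locations
-- ===== SOURCE A (Python) =====
-- def nrt_locations(tupList2):
--     """
--     Receive list of tuples and return index of NREM-->REM transitions
--     """
--     nrt_locs = []
--     cnt1 = 0
--     while cnt1 < len(tupList2)-1:
--         curr = tupList2[cnt1]
--         nxt = tupList2[cnt1+1]
--         if (curr[0]=='N')&(nxt[0]=='R'):
--             nrt_locs.append(cnt1+1)
--         cnt1+=1
--     return nrt_locs
-- ===== SOURCE B (Python) =====
-- def nrt_locations(tupList2):
--     """
--     Receive list of tuples and return index of NREM-->REM transitions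
--     """
--     s = ''.join('N' if t[0] == 'N' else ('R' if t[0] == 'R' else '.') for t in tupList2)
--     nrt_locs = []
--     pos = s.find('NR')
--     while pos != -1:
--         nrt_locs.append(pos + 1)
--         pos = s.find('NR', pos + 1)
--     return nrt_locs
-- ===== Notes on version B (the rewrite author's own statement) =====
-- stated objective: alternative
-- what changed: Instead of comparing adjacent tuples index-by-index, B first encodes the list as a string of marker characters ('N'/'R'/'.') and then collects transition indices by repeated substring search s.find('NR', pos); since 'N' and 'R' differ, matches cannot overlap, so the found positions (+1) are exactly A's indices.
import Mathlib
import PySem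

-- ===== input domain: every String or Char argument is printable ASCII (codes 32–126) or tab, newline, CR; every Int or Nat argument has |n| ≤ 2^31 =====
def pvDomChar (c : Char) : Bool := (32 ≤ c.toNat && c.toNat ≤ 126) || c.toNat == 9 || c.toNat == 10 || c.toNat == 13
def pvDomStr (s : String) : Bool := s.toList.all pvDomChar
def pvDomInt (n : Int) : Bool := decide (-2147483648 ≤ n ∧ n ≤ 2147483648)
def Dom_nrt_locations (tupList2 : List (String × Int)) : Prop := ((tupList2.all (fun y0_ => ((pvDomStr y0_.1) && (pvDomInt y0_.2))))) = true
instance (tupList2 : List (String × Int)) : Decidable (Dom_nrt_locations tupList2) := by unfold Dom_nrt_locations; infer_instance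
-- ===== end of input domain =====

-- B encodes the list as a marker string ('N'/'R'/'.') and collects transitions by
-- repeated substring search s.find('NR', pos) instead of comparing adjacent tuples.

-- ===== PORT A =====
-- while cnt1 < len(tupList2)-1: read tupList2[cnt1], tupList2[cnt1+1]; append cnt1+1 on 'N','R'
def nrt_locations (tupList2 : List (String × Int)) : List Int :=
  (PySem.List.pyRange 0 ((tupList2.length : Int) - 1) 1).foldl
    (fun nrt_locs cnt1 =>
      let curr := PySem.List.pyGetD tupList2 cnt1 ("", 0)
      let nxt := PySem.List.pyGetD tupList2 (cnt1 + 1) ("", 0)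
      if curr.1 = "N" ∧ nxt.1 = "R" then nrt_locs ++ [cnt1 + 1] else nrt_locs) []

-- ===== PORT B =====
-- ''.join('N' if t[0]=='N' else ('R' if t[0]=='R' else '.') for t in tupList2)
def nrMark (t : String × Int) : String :=
  if t.1 = "N" then "N" else if t.1 = "R" then "R" else "."

-- the while loop: pos = s.find('NR', pos+1) until -1; fuel is only a totality guard
-- (positions strictly increase and are bounded by len(s))
def nrLoop (s : String) : Nat → Int → List Int → List Int
  | 0, _, acc => acc
  | fuel + 1, pos, acc =>
    if pos = -1 then acc
    else nrLoop s fuel (PySem.Str.findFrom s "NR" (pos + 1) none) (acc ++ [pos + 1])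

def nrt_locations_alt (tupList2 : List (String × Int)) : List Int :=
  let s := PySem.Str.join "" (tupList2.map nrMark)
  nrLoop s ((PySem.Str.len s).toNat + 1) (PySem.Str.find s "NR") []

-- ===== PRECONDITION & SPEC =====
def Spec_nrt_locations (tupList2 : List (String × Int)) (out : List Int) : Prop := out = nrt_locations_alt tupList2
instance (tupList2 : List (String × Int)) (out : List Int) : Decidable (Spec_nrt_locations tupList2 out) := by unfold Spec_nrt_locations; infer_instance

-- ===== CLAIM (what is proved, stated in full; the proofs are below) =====
def Claim_equal_nrt_locations : Prop := ∀ (tupList2 : List (String × Int)), Dom_nrt_locations tupList2 → Spec_nrt_locations tupList2 (nrt_locations tupList2)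

-- ===== LEMMAS AND PROOFS =====

-- common recursive shape on the tuple list: emit s at each adjacent N,R pair
def nrtGo : List (String × Int) → Int → List Int
  | a :: b :: rest, s =>
      (if a.1 = "N" ∧ b.1 = "R" then [s] else []) ++ nrtGo (b :: rest) (s + 1)
  | _, _ => []

-- the same shape on the marker characters
def nrScanC : List Char → Int → List Int
  | a :: b :: rest, k =>
      (if a = 'N' ∧ b = 'R' then [k + 1] else []) ++ nrScanC (b :: rest) (k + 1)
  | _, _ => []

-- positions ≥ k where ['N','R'] starts, +1 each, in increasing order
def matchesFrom (cs : List Char) (k : Nat) : List Int :=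
  if h : k < cs.length then
    (if ['N','R'] <+: cs.drop k then [(k : Int) + 1] else []) ++ matchesFrom cs (k + 1)
  else []
termination_by cs.length - k

lemma a_loop_eq_go : ∀ (l : List (String × Int)) (off : Int) (acc : List Int),
    (PySem.List.pyRange 0 ((l.length : Int) - 1) 1).foldl
      (fun nrt_locs j =>
        if (PySem.List.pyGetD l j ("", 0)).1 = "N" ∧
           (PySem.List.pyGetD l (j + 1) ("", 0)).1 = "R"
        then nrt_locs ++ [off + j + 1] else nrt_locs) acc
    = acc ++ nrtGo l (off + 1) := by
  intro l
  induction l with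
  | nil =>
    intro off acc
    rw [show ((List.length ([] : List (String × Int)) : Int) - 1) = -1 by simp]
    rw [PySem.List.pyRange_one_eq_nil (by omega)]
    simp [nrtGo]
  | cons a tl ih =>
    intro off acc
    cases tl with
    | nil =>
      rw [show ((List.length [a] : Int) - 1) = 0 by simp]
      rw [PySem.List.pyRange_one_eq_nil (by omega)]
      simp [nrtGo]
    | cons b rest =>
      have hlen : ((a :: b :: rest).length : Int) - 1 = (rest.length : Int) + 1 := by
        push_cast [List.length_cons]; ring
      rw [hlen, PySem.List.pyRange_one_cons (by omega)]
      simp only [List.foldl_cons, zero_add]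
      have h0 : PySem.List.pyGetD (a :: b :: rest) (0 : Int) ("", 0) = a := by
        simp [PySem.List.pyGetD_zero_cons]
      have h1 : PySem.List.pyGetD (a :: b :: rest) (1 : Int) ("", 0) = b := by
        simpa using PySem.List.pyGetD_natCast (a :: b :: rest) 1 ("", 0)
      rw [h0, h1]
      have hrange : PySem.List.pyRange 1 ((rest.length : Int) + 1) 1
          = (List.range rest.length).map (fun k : Nat => (1 : Int) + (k : Int)) := by
        rw [PySem.List.pyRange_one,
          show ((rest.length : Int) + 1 - 1).toNat = rest.length by omega]
      have hrange' : PySem.List.pyRange 0 (((b :: rest).length : Int) - 1) 1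
          = (List.range rest.length).map (fun k : Nat => ((k : Nat) : Int)) := by
        rw [PySem.List.pyRange_one]
        rw [show (((b :: rest).length : Int) - 1 - 0).toNat = rest.length by simp]
        simp
      set acc0 := if a.1 = "N" ∧ b.1 = "R" then acc ++ [off + 0 + 1] else acc with hacc0
      have hshift :
          (PySem.List.pyRange 1 ((rest.length : Int) + 1) 1).foldl
            (fun nrt_locs j =>
              if (PySem.List.pyGetD (a :: b :: rest) j ("", 0)).1 = "N" ∧
                 (PySem.List.pyGetD (a :: b :: rest) (j + 1) ("", 0)).1 = "R"
              then nrt_locs ++ [off + j + 1] else nrt_locs) acc0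
          = (PySem.List.pyRange 0 (((b :: rest).length : Int) - 1) 1).foldl
            (fun nrt_locs j =>
              if (PySem.List.pyGetD (b :: rest) j ("", 0)).1 = "N" ∧
                 (PySem.List.pyGetD (b :: rest) (j + 1) ("", 0)).1 = "R"
              then nrt_locs ++ [(off + 1) + j + 1] else nrt_locs) acc0 := by
        rw [hrange, hrange', List.foldl_map, List.foldl_map]
        apply PySem.List.foldl_congr_mem
        intro x k hk
        have e0 : (1 : Int) + (k : Int) = ((k + 1 : Nat) : Int) := by push_cast; ring
        rw [e0]
        have g0 : PySem.List.pyGetD (a :: b :: rest) ((k + 1 : Nat) : Int) ("", 0)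
            = PySem.List.pyGetD (b :: rest) ((k : Nat) : Int) ("", 0) := by
          rw [PySem.List.pyGetD_natCast, PySem.List.pyGetD_natCast, List.getD_cons_succ]
        have g1 : PySem.List.pyGetD (a :: b :: rest) (((k + 1 : Nat) : Int) + 1) ("", 0)
            = PySem.List.pyGetD (b :: rest) (((k : Nat) : Int) + 1) ("", 0) := by
          rw [show ((k + 1 : Nat) : Int) + 1 = ((k + 2 : Nat) : Int) by push_cast; ring]
          rw [show ((k : Nat) : Int) + 1 = ((k + 1 : Nat) : Int) by push_cast; ring]
          rw [PySem.List.pyGetD_natCast, PySem.List.pyGetD_natCast, List.getD_cons_succ]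
        rw [g0, g1,
          show off + ((k + 1 : Nat) : Int) + 1 = (off + 1) + ((k : Nat) : Int) + 1 by
            push_cast; ring]
      rw [hshift, ih (off + 1) acc0, nrtGo, hacc0]
      by_cases h : a.1 = "N" ∧ b.1 = "R" <;> simp [h]

-- marker character of a tuple
def nrEnc (t : String × Int) : Char := if t.1 = "N" then 'N' else if t.1 = "R" then 'R' else '.'

lemma nrEnc_eq_N (t : String × Int) : nrEnc t = 'N' ↔ t.1 = "N" := by
  unfold nrEnc; split_ifs with h1 h2 <;> simp_all

lemma nrEnc_eq_R (t : String × Int) : nrEnc t = 'R' ↔ t.1 = "R" := by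
  unfold nrEnc; split_ifs with h1 h2 <;> simp_all

lemma go_eq_scan : ∀ (l : List (String × Int)) (k : Int),
    nrtGo l (k + 1) = nrScanC (l.map nrEnc) k := by
  intro l
  induction l with
  | nil => intro k; simp [nrtGo, nrScanC]
  | cons a tl ih =>
    intro k
    cases tl with
    | nil => simp [nrtGo, nrScanC]
    | cons b rest =>
      simp only [List.map_cons] at *
      rw [nrtGo, nrScanC, ih (k + 1)]
      by_cases ha : a.1 = "N" <;> by_cases hb : b.1 = "R" <;>
        simp [ha, hb, nrEnc_eq_N, nrEnc_eq_R]

lemma matches_eq_scan : ∀ (n k : Nat) (cs : List Char), cs.length - k ≤ n →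
    matchesFrom cs k = nrScanC (cs.drop k) (k : Int) := by
  intro n
  induction n with
  | zero =>
    intro k cs h
    rw [matchesFrom]
    rw [dif_neg (by omega)]
    rw [List.drop_eq_nil_of_le (by omega)]
    simp [nrScanC]
  | succ n ih =>
    intro k cs h
    rw [matchesFrom]
    by_cases hk : k < cs.length
    · rw [dif_pos hk]
      rw [ih (k + 1) cs (by omega)]
      have hd : cs.drop k = cs[k] :: cs.drop (k + 1) := List.drop_eq_getElem_cons hk
      rw [hd]
      cases h2 : cs.drop (k + 1) with
      | nil =>
        have : ¬ (['N','R'] <+: cs[k] :: ([] : List Char)) := by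
          intro hp
          have := hp.length_le
          simp at this
        rw [hd, h2] at *
        simp [nrScanC, this]
      | cons b rest =>
        have hpre : (['N','R'] <+: cs[k] :: b :: rest) ↔ (cs[k] = 'N' ∧ b = 'R') := by
          constructor
          · intro hp
            rcases hp with ⟨t, ht⟩
            simp at ht
            exact ⟨ht.1.symm, ht.2.1.symm⟩
          · rintro ⟨h1, h3⟩
            exact ⟨rest, by simp [h1, h3]⟩
        rw [hd, h2] at *
        rw [nrScanC]
        by_cases hc : cs[k] = 'N' ∧ b = 'R' <;> simp [hc, hpre]
    · rw [dif_neg hk]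
      rw [List.drop_eq_nil_of_le (by omega)]
      simp [nrScanC]

-- a prefix match of ['N','R'] at m forces m + 2 ≤ length
lemma match_lt (cs : List Char) (m : Nat) (h : ['N','R'] <+: cs.drop m) : m + 2 ≤ cs.length := by
  have h1 := h.length_le
  simp at h1
  omega

lemma matchesFrom_nil_of_none : ∀ (n k : Nat) (cs : List Char), cs.length - k ≤ n →
    (∀ i, k ≤ i → ¬ (['N','R'] <+: cs.drop i)) → matchesFrom cs k = [] := by
  intro n
  induction n with
  | zero =>
    intro k cs h _
    rw [matchesFrom, dif_neg (by omega)]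
  | succ n ih =>
    intro k cs h hnone
    rw [matchesFrom]
    by_cases hk : k < cs.length
    · rw [dif_pos hk, if_neg (hnone k le_rfl),
        ih (k + 1) cs (by omega) (fun i hi => hnone i (by omega))]
      simp
    · rw [dif_neg hk]

lemma matchesFrom_skip : ∀ (n k m : Nat) (cs : List Char), m - k ≤ n → k ≤ m →
    (∀ i, k ≤ i → i < m → ¬ (['N','R'] <+: cs.drop i)) →
    (['N','R'] <+: cs.drop m) →
    matchesFrom cs k = ((m : Int) + 1) :: matchesFrom cs (m + 1) := by
  intro n
  induction n with
  | zero =>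
    intro k m cs h hkm _ hm
    have hk : k = m := by omega
    subst hk
    rw [matchesFrom, dif_pos (by have := match_lt cs k hm; omega), if_pos hm]
    simp
  | succ n ih =>
    intro k m cs h hkm hmin hm
    by_cases he : k = m
    · subst he
      rw [matchesFrom, dif_pos (by have := match_lt cs k hm; omega), if_pos hm]
      simp
    · have hklt : k < m := by omega
      rw [matchesFrom, dif_pos (by have := match_lt cs m hm; omega),
        if_neg (hmin k le_rfl hklt),
        ih (k + 1) m cs (by omega) (by omega) (fun i hi => hmin i (by omega)) hm]
      simp

-- infix of the k-suffix ↔ a prefix match at some i ≥ k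
lemma infix_drop_iff (cs sub : List Char) (k : Nat) :
    (sub <:+: cs.drop k) ↔ ∃ i, k ≤ i ∧ sub <+: cs.drop i := by
  constructor
  · intro h
    rw [← PySem.Chars.isIn_iff_infix, ← PySem.Chars.exists_prefix_drop_iff_isIn] at h
    rcases h with ⟨j, hj⟩
    exact ⟨k + j, by omega, by rwa [List.drop_drop] at hj⟩
  · rintro ⟨i, hki, hp⟩
    have : sub <+: (cs.drop k).drop (i - k) := by
      rwa [List.drop_drop, Nat.add_sub_cancel' hki]
    rw [← PySem.Chars.isIn_iff_infix, ← PySem.Chars.exists_prefix_drop_iff_isIn]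
    exact ⟨i - k, this⟩

lemma NR_toList : ("NR" : String).toList = ['N','R'] := rfl

-- main B-side loop characterisation
lemma loop_eq (s : String) : ∀ (fuel k : Nat) (acc : List Int), k ≤ s.toList.length →
    s.toList.length - k < fuel →
    nrLoop s fuel (PySem.Chars.findFrom s.toList ['N','R'] (k : Int) none) acc
      = acc ++ matchesFrom s.toList k := by
  intro fuel
  induction fuel with
  | zero => intro k acc h1 h2; omega
  | succ fuel ih =>
    intro k acc hk hfuel
    set cs := s.toList with hcs
    by_cases hr : PySem.Chars.findFrom cs ['N','R'] (k : Int) none = -1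
    · rw [nrLoop, if_pos hr]
      have hnone : ¬ (['N','R'] <:+: cs.drop k) := by
        rw [← PySem.Chars.findFrom_natCast_eq_neg_one_iff cs ['N','R'] k hk]
        exact hr
      rw [matchesFrom_nil_of_none (cs.length - k) k cs le_rfl
        (fun i hi hp => hnone ((infix_drop_iff cs ['N','R'] k).2 ⟨i, hi, hp⟩))]
      simp
    · obtain ⟨hge, hpre, hmin⟩ := PySem.Chars.findFrom_natCast_spec cs ['N','R'] k hk hr
      set r := PySem.Chars.findFrom cs ['N','R'] (k : Int) none with hrdef
      have hr0 : 0 ≤ r := le_trans (by exact_mod_cast Int.natCast_nonneg k) hge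
      set m := r.toNat with hmdef
      have hrm : r = (m : Int) := by omega
      have hm2 : m + 2 ≤ cs.length := match_lt cs m hpre
      have hkm : k ≤ m := by omega
      rw [nrLoop, if_neg hr]
      have hnext : PySem.Str.findFrom s "NR" (r + 1) none
          = PySem.Chars.findFrom cs ['N','R'] ((m + 1 : Nat) : Int) none := by
        rw [PySem.Str.findFrom_eq, NR_toList, hrm]
        norm_num
        rfl
      rw [hnext, ih (m + 1) (acc ++ [r + 1]) (by omega) (by omega)]
      rw [matchesFrom_skip (m - k) k m cs le_rfl hkm
        (fun i h1 h2 => hmin i (by exact_mod_cast h1)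
          (by omega)) hpre]
      simp [hrm]

lemma toList_markers (l : List (String × Int)) :
    (PySem.Str.join "" (l.map nrMark)).toList = l.map nrEnc := by
  rw [PySem.Str.toList_join]
  have : (l.map nrMark).map String.toList = (l.map nrEnc).map (fun c => [c]) := by
    simp only [List.map_map]
    apply List.map_congr_left
    intro t _
    simp only [Function.comp_apply]
    unfold nrMark nrEnc
    split_ifs <;> rfl
  rw [this]
  simpa using PySem.Chars.join_nil_singletons (l.map nrEnc)

-- B port evaluates to the canonical scan
lemma alt_eq (l : List (String × Int)) :
    nrt_locations_alt l = nrScanC (l.map nrEnc) 0 := by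
  set s := PySem.Str.join "" (l.map nrMark) with hsdef
  show nrLoop s ((PySem.Str.len s).toNat + 1) (PySem.Str.find s "NR") [] = _
  have hstart : PySem.Str.find s "NR"
      = PySem.Chars.findFrom s.toList ['N','R'] ((0 : Nat) : Int) none := by
    rw [PySem.Str.find_eq, NR_toList]
    exact (PySem.Chars.findFrom_zero s.toList ['N','R']).symm
  have hlen : s.toList.length ≤ (PySem.Str.len s).toNat := by
    simp only [PySem.Str.len_eq]
    omega
  rw [hstart, loop_eq s ((PySem.Str.len s).toNat + 1) 0 [] (by omega) (by omega)]
  rw [matches_eq_scan s.toList.length 0 s.toList (by omega)]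
  rw [toList_markers l]
  simp

-- ===== VERDICT (by name: the statement is the Claim_ definition above) =====
theorem nrt_locations_spec : Claim_equal_nrt_locations := by
  intro l _
  unfold Spec_nrt_locations nrt_locations
  rw [alt_eq l, ← go_eq_scan l 0]
  have hA := a_loop_eq_go l 0 []
  simp only [zero_add, List.nil_append] at hA
  exact hA
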